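-- pv_equiv track=rewrite | github.com/JayC319/IC_Design_Laboratory--Digital-Signature-Authenticator | software/sha3_util.py | txt_to_pat
-- ===== SOURCE A (Python) =====
-- def txt_to_pat(S_txt):
--     lst = list(S_txt)
--     asc = [ord(char) for char in lst]
--     S_bin = [list(format(a, '08b')) for a in asc]
--     S_bin = [''.join(char_bin) for char_bin in S_bin]
--     pat = ''
--     for i in range(len(S_bin)):
--         if i == len(S_bin) - 1:
--             pat = pat + S_bin[i]
--         elif i % 8 == 7:
--             pat = pat + S_bin[i] + '\n'
--         else:
--             pat = pat + S_bin[i] + '_'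
--
--     return pat
-- ===== SOURCE B (Python) =====
-- def txt_to_pat(S_txt):
--     bins = [format(ord(c), '08b') for c in S_txt]
--     groups = ['_'.join(bins[i:i + 8]) for i in range(0, len(bins), 8)]
--     return '\n'.join(groups)
-- ===== Notes on version B (the rewrite author's own statement) =====
-- stated objective: simpler
-- what changed: Replaces the flat index loop with last-index/modulo separator tests by a two-level decomposition: chunk the 8-bit strings into groups of 8 via slicing, '_'-join each group, '\n'-join the groups.
import Mathlib
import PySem

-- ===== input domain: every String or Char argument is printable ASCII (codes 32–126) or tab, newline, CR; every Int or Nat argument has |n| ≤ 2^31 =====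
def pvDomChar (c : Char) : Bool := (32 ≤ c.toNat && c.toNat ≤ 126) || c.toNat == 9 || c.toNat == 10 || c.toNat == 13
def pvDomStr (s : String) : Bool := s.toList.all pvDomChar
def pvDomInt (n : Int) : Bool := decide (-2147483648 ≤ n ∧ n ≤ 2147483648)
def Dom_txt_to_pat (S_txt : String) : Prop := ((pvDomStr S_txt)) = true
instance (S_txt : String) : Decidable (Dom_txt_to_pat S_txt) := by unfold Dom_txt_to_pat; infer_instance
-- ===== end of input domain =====

-- B replaces A's flat index loop with modulo/last-index separator tests by chunking into
-- groups of 8 and joining twice ('_' inside a group, '\n' between groups); same output, simpler.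

-- ===== PORT A =====
-- format(a, '08b') for ord values (0 ≤ a): binary digits zero-padded to width 8
def pvFmt08b (a : Int) : List Char := PySem.Chars.zfill (PySem.Int.toBinChars a) 8

def txt_to_pat (S_txt : String) : String :=
  let lst := S_txt.toList
  let asc : List Int := lst.map (fun c => (c.toNat : Int))
  let S_bin1 : List (List Char) := asc.map (fun a => pvFmt08b a)     -- list(format(a,'08b'))
  let S_bin : List (List Char) :=
    S_bin1.map (fun cb => PySem.Chars.join [] (cb.map (fun c => [c])))  -- ''.join(char_bin)
  let pat : List Char :=
    (PySem.List.pyRange 0 (PySem.List.len S_bin) 1).foldl (fun pat i =>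
      if i == PySem.List.len S_bin - 1 then pat ++ PySem.List.pyGetD S_bin i []
      else if PySem.Int.mod i 8 == 7 then pat ++ PySem.List.pyGetD S_bin i [] ++ ['\n']
      else pat ++ PySem.List.pyGetD S_bin i [] ++ ['_']) []
  String.ofList pat

-- ===== PORT B =====
def txt_to_pat_alt (S_txt : String) : String :=
  let bins : List (List Char) := S_txt.toList.map (fun c => pvFmt08b (c.toNat : Int))
  let groups : List (List Char) :=
    (PySem.List.pyRange 0 (PySem.List.len bins) 8).map
      (fun i => PySem.Chars.join ['_'] (PySem.List.slice bins (some i) (some (i + 8))))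
  String.ofList (PySem.Chars.join ['\n'] groups)

-- ===== PRECONDITION & SPEC =====
def Spec_txt_to_pat (S_txt : String) (out : String) : Prop := out = txt_to_pat_alt S_txt
instance (S_txt : String) (out : String) : Decidable (Spec_txt_to_pat S_txt out) := by unfold Spec_txt_to_pat; infer_instance

-- ===== CLAIM (what is proved, stated in full; the proofs are below) =====
def Claim_equal_txt_to_pat : Prop := ∀ (S_txt : String), Dom_txt_to_pat S_txt → Spec_txt_to_pat S_txt (txt_to_pat S_txt)

-- ===== LEMMAS AND PROOFS =====

-- A's result on the list of binary strings, in Nat-indexed flattened form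
def pvSep (n k : Nat) : List Char :=
  if k = n - 1 then [] else if k % 8 = 7 then ['\n'] else ['_']

def pvAFlat (bs : List (List Char)) : List Char :=
  ((List.range bs.length).map (fun k => bs.getD k [] ++ pvSep bs.length k)).flatten

-- B's result in Nat-indexed chunked form
def pvBChunks (bs : List (List Char)) : List Char :=
  PySem.Chars.join ['\n']
    ((List.range ((bs.length + 7) / 8)).map
      (fun k => PySem.Chars.join ['_'] ((bs.drop (8 * k)).take 8)))

lemma pvJoin_cons_ne (sep p : List Char) (l : List (List Char)) (h : l ≠ []) :
    PySem.Chars.join sep (p :: l) = p ++ sep ++ PySem.Chars.join sep l := by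
  cases l with
  | nil => exact absurd rfl h
  | cons q rest => exact PySem.Chars.join_cons_cons sep p q rest

-- one incomplete (or final complete) chunk: separators '_' everywhere except after the last
lemma pvFlat_small (bs : List (List Char)) :
    ((List.range bs.length).map
      (fun k => bs.getD k [] ++ if k = bs.length - 1 then [] else ['_'])).flatten
    = PySem.Chars.join ['_'] bs := by
  induction bs with
  | nil => simp [PySem.Chars.join_nil]
  | cons p rest ih =>
    cases rest with
    | nil => simp [PySem.Chars.join_singleton]
    | cons q t =>
      rw [show (p :: q :: t).length = (q :: t).length + 1 from rfl, List.range_succ_eq_map,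
          pvJoin_cons_ne _ _ _ (by simp)]
      simp only [List.map_cons, List.map_map, List.flatten_cons]
      have hmap : ((List.range (q :: t).length).map
          ((fun k => (p :: q :: t).getD k [] ++ if k = (q :: t).length + 1 - 1 then [] else ['_']) ∘ Nat.succ))
          = (List.range (q :: t).length).map
            (fun k => (q :: t).getD k [] ++ if k = (q :: t).length - 1 then [] else ['_']) := by
        apply List.map_congr_left
        intro k hk
        simp only [Function.comp, List.getD_cons_succ, List.length_cons]
        congr 1
        by_cases h : k = t.length + 1 - 1
        · rw [if_pos (by omega), if_pos (by omega)]
        · rw [if_neg (by omega), if_neg (by omega)]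
      rw [hmap, ih]
      simp [List.append_assoc]

-- a full internal chunk of exactly 8: '_' separators and a trailing '\n'
lemma pvFlat_full (cs : List (List Char)) (h : cs.length = 8) :
    ((List.range 8).map
      (fun k => cs.getD k [] ++ if k % 8 = 7 then ['\n'] else ['_'])).flatten
    = PySem.Chars.join ['_'] cs ++ ['\n'] := by
  match cs, h with
  | [c0, c1, c2, c3, c4, c5, c6, c7], _ =>
    simp [List.range_succ, PySem.Chars.join_cons_cons, PySem.Chars.join_singleton]

lemma pvMain (bs : List (List Char)) : pvAFlat bs = pvBChunks bs := by
  generalize hn : bs.length = n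
  induction n using Nat.strong_induction_on generalizing bs with
  | _ n ih =>
  by_cases h0 : n = 0
  · subst h0
    have : bs = [] := List.eq_nil_of_length_eq_zero hn
    subst this
    simp [pvAFlat, pvBChunks, PySem.Chars.join_nil]
  by_cases h8 : n ≤ 8
  · -- single chunk
    have hm : (n + 7) / 8 = 1 := by omega
    unfold pvAFlat pvBChunks
    rw [hn, hm]
    have htake : bs.take 8 = bs := List.take_of_length_le (by omega)
    simp only [List.range_one, List.map_cons, List.map_nil, Nat.mul_zero, List.drop_zero,
      htake, PySem.Chars.join_singleton]
    rw [← pvFlat_small bs, hn]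
    apply congrArg
    apply List.map_congr_left
    intro k hk
    rw [List.mem_range] at hk
    congr 1
    unfold pvSep
    split_ifs with h1 h2 <;> first | rfl | omega
  · -- first full chunk of 8, then recurse on the rest
    have h9 : 9 ≤ n := by omega
    have hrest : (bs.drop 8).length = n - 8 := by simp [hn]
    have hIH : pvAFlat (bs.drop 8) = pvBChunks (bs.drop 8) := ih (n - 8) (by omega) _ hrest
    -- LHS
    unfold pvAFlat
    rw [hn, show n = 8 + (n - 8) by omega, List.range_add]
    simp only [List.map_append, List.map_map, List.flatten_append]
    have hfirst : ((List.range 8).map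
        (fun k => bs.getD k [] ++ pvSep (8 + (n - 8)) k)).flatten
        = PySem.Chars.join ['_'] (bs.take 8) ++ ['\n'] := by
      rw [← pvFlat_full (bs.take 8) (by rw [List.length_take]; omega)]
      apply congrArg
      apply List.map_congr_left
      intro k hk
      rw [List.mem_range] at hk
      have hget : (bs.take 8).getD k [] = bs.getD k [] := by
        simp [List.getD_eq_getElem?_getD, List.getElem?_take_of_lt hk]
      rw [hget]
      congr 1
      unfold pvSep
      split_ifs with h1 h2 <;> first | rfl | omega
    have hsecond : ((List.range (n - 8)).map
        ((fun k => bs.getD k [] ++ pvSep (8 + (n - 8)) k) ∘ (fun k => 8 + k))).flatten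
        = pvAFlat (bs.drop 8) := by
      unfold pvAFlat
      rw [hrest]
      apply congrArg
      apply List.map_congr_left
      intro k hk
      rw [List.mem_range] at hk
      simp only [Function.comp]
      have hget : bs.getD (8 + k) [] = (bs.drop 8).getD k [] := by
        simp [List.getD_eq_getElem?_getD, List.getElem?_drop]
      rw [hget]
      congr 1
      unfold pvSep
      have hmod : (8 + k) % 8 = k % 8 := by omega
      rw [hmod]
      split_ifs with h1 h2 <;> first | rfl | omega
    rw [hfirst, hsecond, hIH]
    -- RHS
    unfold pvBChunks
    rw [hn, hrest]
    have hm : (n + 7) / 8 = 1 + (n - 8 + 7) / 8 := by omega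
    rw [hm, List.range_add]
    simp only [List.range_one, List.map_cons, List.map_map, Nat.mul_zero, List.drop_zero,
      List.singleton_append]
    have hpos : 0 < (n - 8 + 7) / 8 := Nat.div_pos (by omega) (by norm_num)
    have hne : ((List.range ((n - 8 + 7) / 8)).map
        ((fun k => PySem.Chars.join ['_'] ((bs.drop (8 * k)).take 8)) ∘ (fun k => 1 + k))) ≠ [] := by
      simp only [ne_eq, List.map_eq_nil_iff, List.range_eq_nil]
      omega
    rw [pvJoin_cons_ne _ _ _ hne]
    have hmap : ((List.range ((n - 8 + 7) / 8)).map
        ((fun k => PySem.Chars.join ['_'] ((bs.drop (8 * k)).take 8)) ∘ (fun k => 1 + k)))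
        = (List.range ((n - 8 + 7) / 8)).map
          (fun k => PySem.Chars.join ['_'] (((bs.drop 8).drop (8 * k)).take 8)) := by
      apply List.map_congr_left
      intro k hk
      simp only [Function.comp]
      rw [List.drop_drop, show 8 + 8 * k = 8 * (1 + k) by ring]
    rw [hmap]

-- A's port reduces to pvAFlat of the common binary-string list
lemma pvA_eq (bs : List (List Char)) :
    (PySem.List.pyRange 0 (PySem.List.len bs) 1).foldl (fun pat i =>
      if i == PySem.List.len bs - 1 then pat ++ PySem.List.pyGetD bs i []
      else if PySem.Int.mod i 8 == 7 then pat ++ PySem.List.pyGetD bs i [] ++ ['\n']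
      else pat ++ PySem.List.pyGetD bs i [] ++ ['_']) []
    = pvAFlat bs := by
  have hfun : (fun (pat : List Char) (i : Int) =>
      if i == PySem.List.len bs - 1 then pat ++ PySem.List.pyGetD bs i []
      else if PySem.Int.mod i 8 == 7 then pat ++ PySem.List.pyGetD bs i [] ++ ['\n']
      else pat ++ PySem.List.pyGetD bs i [] ++ ['_'])
      = (fun pat i => pat ++ (PySem.List.pyGetD bs i [] ++
          (if i == PySem.List.len bs - 1 then []
           else if PySem.Int.mod i 8 == 7 then ['\n'] else ['_']))) := by
    funext pat i
    split_ifs <;> simp [List.append_assoc]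
  rw [hfun, PySem.List.foldl_append_eq_flatMap]
  simp only [List.nil_append, PySem.List.len_eq, pvAFlat]
  rw [PySem.List.pyRange_zero_natCast, List.flatMap_def, List.map_map]
  apply congrArg
  apply List.map_congr_left
  intro k hk
  rw [List.mem_range] at hk
  simp only [Function.comp, PySem.List.pyGetD_natCast]
  congr 1
  unfold pvSep
  have hmod : PySem.Int.mod (k : Int) 8 = ((k % 8 : Nat) : Int) := by
    exact_mod_cast PySem.Int.mod_natCast k 8
  rw [hmod]
  have h1 : ((k : Int) == (bs.length : Int) - 1) = decide (k = bs.length - 1) := by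
    by_cases h : k = bs.length - 1 <;> simp [h] <;> omega
  have h2 : (((k % 8 : Nat) : Int) == (7 : Int)) = decide (k % 8 = 7) := by
    by_cases h : k % 8 = 7 <;> simp [h] <;> omega
  rw [h1, h2]
  split_ifs with ha hb <;> simp_all

-- B's port reduces to pvBChunks of the common binary-string list
lemma pvB_eq (bs : List (List Char)) :
    PySem.Chars.join ['\n']
      ((PySem.List.pyRange 0 (PySem.List.len bs) 8).map
        (fun i => PySem.Chars.join ['_'] (PySem.List.slice bs (some i) (some (i + 8)))))
    = pvBChunks bs := by
  unfold pvBChunks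
  apply congrArg
  rw [PySem.List.len_eq, PySem.List.pyRange_of_pos 0 (bs.length : Int) (by norm_num)]
  have hcount : (if (0 : Int) < (bs.length : Int)
      then (((bs.length : Int) - 0 + 8 - 1) / 8).toNat else 0) = (bs.length + 7) / 8 := by
    split_ifs with h
    · have : ((bs.length : Int) - 0 + 8 - 1) = ((bs.length + 7 : Nat) : Int) := by push_cast; ring
      rw [this, show (8 : Int) = ((8 : Nat) : Int) from rfl, ← Int.natCast_div, Int.toNat_natCast]
    · have : bs.length = 0 := by omega
      omega
  rw [hcount, List.map_map]
  apply List.map_congr_left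
  intro k hk
  simp only [Function.comp]
  have hslice : PySem.List.slice bs (some ((0 : Int) + 8 * (k : Int)))
      (some ((0 : Int) + 8 * (k : Int) + 8)) = (bs.drop (8 * k)).take 8 := by
    rw [PySem.List.slice_toNat bs (by positivity) (by positivity)]
    congr 1
    · omega
    · congr 1
      omega
  rw [hslice]

-- ===== VERDICT (by name: the statement is the Claim_ definition above) =====
theorem txt_to_pat_spec : Claim_equal_txt_to_pat := by
  intro S_txt _
  unfold Spec_txt_to_pat txt_to_pat txt_to_pat_alt
  simp only [List.map_map]
  apply congrArg
  have hbins : S_txt.toList.map ((fun cb => PySem.Chars.join [] (cb.map (fun c => [c]))) ∘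
      ((fun a => pvFmt08b a) ∘ (fun c => (c.toNat : Int))))
      = S_txt.toList.map (fun c => pvFmt08b (c.toNat : Int)) := by
    apply List.map_congr_left
    intro c _
    simp only [Function.comp]
    exact PySem.Chars.join_nil_singletons (pvFmt08b (c.toNat : Int))
  rw [hbins, pvA_eq, pvB_eq, pvMain]
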